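-- pv_equiv track=rewrite | github.com/bronenos/alexsa_buh | helper.py | common_excel_formula
-- ===== SOURCE A (Python) =====
-- def common_excel_formula(lang, formula):
--     packages = {
--         'ru': [
--             ('DATEVALUE', 'ДАТАЗНАЧ'),
--             ('INDIRECT', 'ДВССЫЛ'),
--             ('DATEDIF', 'РАЗНДАТ'),
--             ('EOMONTH', 'КОНМЕСЯЦА'),
--             ('ISBLANK', 'ЕПУСТО'),
--             ('ADDRESS', 'АДРЕС'),
--             ('COLUMN', 'СТОЛБЕЦ'),
--             ('ROW', 'СТРОКА'),
--             ('DAY', 'ДЕНЬ'),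
--             ('SUM', 'СУММ'),
--             ('IF', 'ЕСЛИ'),
--         ]
--     }
--
--     package = packages.get(lang, list())
--     for (original_name, need_name) in package:
--         formula = formula.replace(original_name, need_name)
--
--     return formula
-- ===== SOURCE B (Python) =====
-- def common_excel_formula(lang, formula):
--     packages = {
--         'ru': [
--             ('DATEVALUE', 'ДАТАЗНАЧ'),
--             ('INDIRECT', 'ДВССЫЛ'),
--             ('DATEDIF', 'РАЗНДАТ'),
--             ('EOMONTH', 'КОНМЕСЯЦА'),
--             ('ISBLANK', 'ЕПУСТО'),
--             ('ADDRESS', 'АДРЕС'),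
--             ('COLUMN', 'СТОЛБЕЦ'),
--             ('ROW', 'СТРОКА'),
--             ('DAY', 'ДЕНЬ'),
--             ('SUM', 'СУММ'),
--             ('IF', 'ЕСЛИ'),
--         ]
--     }
--
--     table = packages.get(lang, list())
--     out = []
--     i = 0
--     n = len(formula)
--     while i < n:
--         for original_name, need_name in table:
--             if formula.startswith(original_name, i):
--                 out.append(need_name)
--                 i += len(original_name)
--                 break
--         else:
--             out.append(formula[i])
--             i += 1
--     return ''.join(out)
-- ===== Notes on version B (the rewrite author's own statement) =====
-- stated objective: alternative
-- what changed: A runs eleven sequential full-string str.replace passes (one per function name); B makes a single left-to-right scan that at each position emits the first matching name's translation (for-with-break over the table) or copies the character, building the output once.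
import Mathlib
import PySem

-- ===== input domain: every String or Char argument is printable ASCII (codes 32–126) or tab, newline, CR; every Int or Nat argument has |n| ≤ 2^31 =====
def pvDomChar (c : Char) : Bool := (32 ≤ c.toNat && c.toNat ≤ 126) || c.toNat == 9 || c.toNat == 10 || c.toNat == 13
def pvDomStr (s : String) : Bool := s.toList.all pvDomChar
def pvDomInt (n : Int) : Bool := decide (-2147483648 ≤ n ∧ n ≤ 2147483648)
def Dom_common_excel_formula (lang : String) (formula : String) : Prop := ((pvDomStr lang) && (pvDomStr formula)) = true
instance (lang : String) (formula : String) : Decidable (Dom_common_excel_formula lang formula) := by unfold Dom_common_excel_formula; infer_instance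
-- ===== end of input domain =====

-- B replaces A's eleven sequential full-string `.replace` passes by ONE left-to-right scan that at each
-- position emits the first matching name's translation (or copies the character); same return value.

def pvRuTable : List (String × String) :=
  [("DATEVALUE", "ДАТАЗНАЧ"),
   ("INDIRECT", "ДВССЫЛ"),
   ("DATEDIF", "РАЗНДАТ"),
   ("EOMONTH", "КОНМЕСЯЦА"),
   ("ISBLANK", "ЕПУСТО"),
   ("ADDRESS", "АДРЕС"),
   ("COLUMN", "СТОЛБЕЦ"),
   ("ROW", "СТРОКА"),
   ("DAY", "ДЕНЬ"),
   ("SUM", "СУММ"),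
   ("IF", "ЕСЛИ")]

-- ===== PORT A =====
def common_excel_formula (lang : String) (formula : String) : String :=
  let packages : PySem.Dict String (List (String × String)) :=
    PySem.Dict.ofList [("ru", pvRuTable)]
  let package := packages.getD lang []
  package.foldl (fun f pr => PySem.Str.replace f pr.1 pr.2) formula

-- ===== PORT B =====
-- the while-loop of Source B: at each position try the pairs in order (for … break / else), one pass
def pvScan (table : List (List Char × List Char)) (s : List Char) : List Char :=
  match s with
  | [] => []
  | c :: t =>
    match table.find? (fun pr => pr.1.isPrefixOf (c :: t)) with
    | some pr => pr.2 ++ pvScan table (t.drop (pr.1.length - 1))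
    | none => c :: pvScan table t
termination_by s.length
decreasing_by
  · simp only [List.length_drop, List.length_cons]; omega
  · simp only [List.length_cons]; omega

def common_excel_formula_alt (lang : String) (formula : String) : String :=
  let packages : PySem.Dict String (List (String × String)) :=
    PySem.Dict.ofList [("ru", pvRuTable)]
  let table := (packages.getD lang []).map (fun pr => (pr.1.toList, pr.2.toList))
  String.ofList (pvScan table formula.toList)

-- ===== PRECONDITION & SPEC =====
def Spec_common_excel_formula (lang : String) (formula : String) (out : String) : Prop := out = common_excel_formula_alt lang formula
instance (lang : String) (formula : String) (out : String) : Decidable (Spec_common_excel_formula lang formula out) := by unfold Spec_common_excel_formula; infer_instance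

-- ===== CLAIM (what is proved, stated in full; the proofs are below) =====
def Claim_equal_common_excel_formula : Prop := ∀ (lang : String) (formula : String), Dom_common_excel_formula lang formula → Spec_common_excel_formula lang formula (common_excel_formula lang formula)

-- ===== LEMMAS AND PROOFS =====

def pvAscii (c : Char) : Bool := c.toNat < 128

-- a characterization of PySem.Chars.replace with a non-empty pattern, one position at a time
def pvRep (o : Char) (os new : List Char) (s : List Char) : List Char :=
  match s with
  | [] => []
  | c :: t =>
    if (o :: os).isPrefixOf (c :: t) then new ++ pvRep o os new (t.drop os.length)
    else c :: pvRep o os new t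
termination_by s.length
decreasing_by
  · simp only [List.length_drop, List.length_cons]; omega
  · simp only [List.length_cons]; omega

def pvGoodPair (pr : List Char × List Char) : Prop :=
  pr.1 ≠ [] ∧ (∀ c ∈ pr.1, pvAscii c = true) ∧ pr.2 ≠ [] ∧ (∀ c ∈ pr.2, pvAscii c = false)

-- no occurrence of q can start strictly inside (or at the start of) an occurrence of p
def pvPatCond (q p : List Char) : Prop :=
  ∀ j, j < p.length → ¬ q <+: p.drop j ∧ ¬ p.drop j <+: q

def pvFoldRep (T : List (List Char × List Char)) (s : List Char) : List Char :=
  T.foldl (fun f pr => PySem.Chars.replace f pr.1 pr.2) s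

def pvGoodPairB (pr : List Char × List Char) : Bool :=
  !pr.1.isEmpty && pr.1.all pvAscii && !pr.2.isEmpty && pr.2.all (fun c => !pvAscii c)

def pvPatCondB (q p : List Char) : Bool :=
  (List.range p.length).all fun j => !q.isPrefixOf (p.drop j) && !(p.drop j).isPrefixOf q

def pvPairB : List (List Char × List Char) → Bool
  | [] => true
  | x :: xs => xs.all (fun y => pvPatCondB x.1 y.1) && pvPairB xs

theorem pvGoodPair_of_bool (pr : List Char × List Char) (h : pvGoodPairB pr = true) :
    pvGoodPair pr := by
  simp only [pvGoodPairB, Bool.and_eq_true, Bool.not_eq_true', List.isEmpty_eq_false_iff,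
    List.all_eq_true] at h
  exact ⟨h.1.1.1, h.1.1.2, h.1.2, h.2⟩

theorem pvPatCond_of_bool (q p : List Char) (h : pvPatCondB q p = true) :
    pvPatCond q p := by
  intro j hj
  have := List.all_eq_true.mp h j (List.mem_range.mpr hj)
  simp only [Bool.and_eq_true, Bool.not_eq_true'] at this
  constructor
  · intro hc
    have := this.1
    rw [(List.isPrefixOf_iff_prefix).mpr hc] at this
    simp at this
  · intro hc
    have := this.2
    rw [(List.isPrefixOf_iff_prefix).mpr hc] at this
    simp at this

theorem pvPair_of_bool : ∀ l, pvPairB l = true →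
    List.Pairwise (fun x y : List Char × List Char => pvPatCond x.1 y.1) l := by
  intro l
  induction l with
  | nil => intro _; exact List.Pairwise.nil
  | cons x xs ih =>
    intro h
    rw [pvPairB, Bool.and_eq_true] at h
    exact List.pairwise_cons.mpr
      ⟨fun y hy => pvPatCond_of_bool _ _ (List.all_eq_true.mp h.1 y hy), ih h.2⟩

theorem pvGo_eq (o : Char) (os new : List Char) :
    ∀ fuel (l acc : List Char), l.length ≤ fuel →
      PySem.Chars.replace.go (o :: os) new fuel l acc = acc.reverse ++ pvRep o os new l := by
  intro fuel
  induction fuel with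
  | zero =>
    intro l acc hl
    have hl0 : l = [] := List.eq_nil_of_length_eq_zero (Nat.le_zero.mp hl)
    subst hl0
    simp [PySem.Chars.replace.go, pvRep]
  | succ n ih =>
    intro l acc hl
    cases l with
    | nil => simp [PySem.Chars.replace.go, pvRep]
    | cons c t =>
      rw [PySem.Chars.replace.go, pvRep]
      by_cases hpre : (o :: os).isPrefixOf (c :: t) = true
      · rw [if_pos hpre, if_pos hpre, ih _ _ (by simp at hl ⊢; omega)]
        simp [List.drop_succ_cons]
      · rw [if_neg hpre, if_neg hpre,
          ih t (c :: acc) (by simp only [List.length_cons] at hl; omega)]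
        simp

theorem pvReplace_eq_rep (o : Char) (os new u : List Char) :
    PySem.Chars.replace u (o :: os) new = pvRep o os new u := by
  rw [PySem.Chars.replace]
  simp only [List.isEmpty_cons, Bool.false_eq_true, if_false]
  rw [pvGo_eq o os new u.length u [] le_rfl]
  simp

theorem pvRep_ascii_prefix {new : List Char}
    (hn : new ≠ []) (hcyr : ∀ c ∈ new, pvAscii c = false) (o : Char) (os : List Char) :
    ∀ u q, (∀ c ∈ q, pvAscii c = true) → q <+: pvRep o os new u → q <+: u := by
  suffices H : ∀ n u, u.length ≤ n → ∀ q, (∀ c ∈ q, pvAscii c = true) →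
      q <+: pvRep o os new u → q <+: u by
    intro u q hq h; exact H u.length u le_rfl q hq h
  intro n
  induction n with
  | zero =>
    intro u hl q hq h
    have hu : u = [] := List.eq_nil_of_length_eq_zero (Nat.le_zero.mp hl)
    subst hu
    rw [pvRep] at h
    exact h
  | succ n ih =>
    intro u hl q hq h
    cases u with
    | nil => rw [pvRep] at h; exact h
    | cons c t =>
      rw [pvRep] at h
      by_cases hpre : (o :: os).isPrefixOf (c :: t) = true
      · rw [if_pos hpre] at h
        cases q with
        | nil => exact List.nil_prefix
        | cons qh qt =>
          obtain ⟨nh, nt, hnew⟩ := List.exists_cons_of_ne_nil hn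
          subst hnew
          rw [List.cons_append, List.cons_prefix_cons] at h
          have h1 : pvAscii qh = true := hq qh List.mem_cons_self
          have h2 : pvAscii qh = false := h.1 ▸ hcyr nh List.mem_cons_self
          rw [h1] at h2
          exact absurd h2 (by simp)
      · rw [if_neg hpre] at h
        cases q with
        | nil => exact List.nil_prefix
        | cons qh qt =>
          rw [List.cons_prefix_cons] at h
          have hqt : qt <+: t := by
            apply ih t (by simp only [List.length_cons] at hl; omega) qt
              (fun c hc => hq c (List.mem_cons_of_mem _ hc)) h.2
          exact List.cons_prefix_cons.mpr ⟨h.1, hqt⟩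

theorem pvRep_skip (o : Char) (os new : List Char) :
    ∀ n (u : List Char), (∀ j < n, ¬ (o :: os) <+: u.drop j) → n ≤ u.length →
      pvRep o os new u = u.take n ++ pvRep o os new (u.drop n) := by
  intro n
  induction n with
  | zero => intro u h hlen; simp
  | succ n ih =>
    intro u h hlen
    cases u with
    | nil => simp at hlen
    | cons c t =>
      have h0 : ¬ (o :: os) <+: (c :: t) := by simpa using h 0 (Nat.succ_pos n)
      rw [pvRep, if_neg (by simpa [List.isPrefixOf_iff_prefix] using h0)]
      rw [ih t (fun j hj => by simpa [List.drop_succ_cons] using h (j + 1) (by omega))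
        (by simp only [List.length_cons] at hlen; omega)]
      simp [List.take_succ_cons, List.drop_succ_cons]

theorem pvFoldRep_nil (T : List (List Char × List Char)) (hT : ∀ pr ∈ T, pr.1 ≠ []) :
    pvFoldRep T [] = [] := by
  induction T with
  | nil => rfl
  | cons hd tl ih =>
    obtain ⟨o, os, h1⟩ := List.exists_cons_of_ne_nil (hT hd List.mem_cons_self)
    show pvFoldRep tl (PySem.Chars.replace [] hd.1 hd.2) = []
    rw [h1, pvReplace_eq_rep, pvRep]
    exact ih (fun pr hm => hT pr (List.mem_cons_of_mem _ hm))

theorem pvFoldRep_cons (T : List (List Char × List Char)) (hT : ∀ pr ∈ T, pvGoodPair pr) :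
    ∀ (c : Char) (t : List Char), (∀ pr ∈ T, ¬ pr.1 <+: (c :: t)) →
      pvFoldRep T (c :: t) = c :: pvFoldRep T t := by
  induction T with
  | nil => intro c t h; rfl
  | cons hd tl ih =>
    intro c t h
    have hg := hT hd List.mem_cons_self
    obtain ⟨o, os, h1⟩ := List.exists_cons_of_ne_nil hg.1
    have hnp : ¬ (o :: os) <+: (c :: t) := h1 ▸ h hd List.mem_cons_self
    have hrep : pvRep o os hd.2 (c :: t) = c :: pvRep o os hd.2 t := by
      rw [pvRep, if_neg (by simpa [List.isPrefixOf_iff_prefix] using hnp)]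
    have step1 : PySem.Chars.replace (c :: t) hd.1 hd.2 = c :: pvRep o os hd.2 t := by
      rw [h1, pvReplace_eq_rep, hrep]
    have step2 : PySem.Chars.replace t hd.1 hd.2 = pvRep o os hd.2 t := by
      rw [h1, pvReplace_eq_rep]
    show pvFoldRep tl (PySem.Chars.replace (c :: t) hd.1 hd.2)
        = c :: pvFoldRep tl (PySem.Chars.replace t hd.1 hd.2)
    rw [step1, step2]
    apply ih (fun pr hm => hT pr (List.mem_cons_of_mem _ hm)) c (pvRep o os hd.2 t)
    intro pr hm hpref
    have hpref' : pr.1 <+: pvRep o os hd.2 (c :: t) := hrep ▸ hpref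
    have := pvRep_ascii_prefix hg.2.2.1 hg.2.2.2 o os (c :: t) pr.1
      (hT pr (List.mem_cons_of_mem _ hm)).2.1 hpref'
    exact h pr (List.mem_cons_of_mem _ hm) this

theorem pvFoldRep_keep_prefix (T : List (List Char × List Char)) (p : List Char)
    (hT : ∀ pr ∈ T, pr.1 ≠ [] ∧ pvPatCond pr.1 p) :
    ∀ w, pvFoldRep T (p ++ w) = p ++ pvFoldRep T w := by
  induction T with
  | nil => intro w; rfl
  | cons hd tl ih =>
    intro w
    obtain ⟨hne, hpc⟩ := hT hd List.mem_cons_self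
    obtain ⟨o, os, h1⟩ := List.exists_cons_of_ne_nil hne
    rw [h1] at hpc
    have hskip : PySem.Chars.replace (p ++ w) hd.1 hd.2
        = p ++ PySem.Chars.replace w hd.1 hd.2 := by
      rw [h1, pvReplace_eq_rep, pvReplace_eq_rep]
      have hj : ∀ j < p.length, ¬ (o :: os) <+: (p ++ w).drop j := by
        intro j hj hq
        rw [List.drop_append_of_le_length (by omega)] at hq
        rcases List.prefix_or_prefix_of_prefix hq (List.prefix_append _ _) with hc | hc
        · exact (hpc j hj).1 hc
        · exact (hpc j hj).2 hc
      rw [pvRep_skip o os hd.2 p.length (p ++ w) hj (by simp)]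
      rw [List.take_left, List.drop_left]
    show pvFoldRep tl (PySem.Chars.replace (p ++ w) hd.1 hd.2)
        = p ++ pvFoldRep tl (PySem.Chars.replace w hd.1 hd.2)
    rw [hskip]
    exact ih (fun pr hm => hT pr (List.mem_cons_of_mem _ hm)) _

theorem pvFoldRep_keep_cyr (T : List (List Char × List Char)) (hT : ∀ pr ∈ T, pvGoodPair pr)
    (r : List Char) (hr : ∀ c ∈ r, pvAscii c = false) :
    ∀ x, pvFoldRep T (r ++ x) = r ++ pvFoldRep T x := by
  induction T with
  | nil => intro x; rfl
  | cons hd tl ih =>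
    intro x
    have hg := hT hd List.mem_cons_self
    obtain ⟨o, os, h1⟩ := List.exists_cons_of_ne_nil hg.1
    have hskip : PySem.Chars.replace (r ++ x) hd.1 hd.2
        = r ++ PySem.Chars.replace x hd.1 hd.2 := by
      rw [h1, pvReplace_eq_rep, pvReplace_eq_rep]
      have hj : ∀ j < r.length, ¬ (o :: os) <+: (r ++ x).drop j := by
        intro j hjr hq
        rw [List.drop_append_of_le_length (by omega)] at hq
        have hdne : r.drop j ≠ [] := by
          intro hh; rw [List.drop_eq_nil_iff] at hh; omega
        obtain ⟨rc, rr, hdd⟩ := List.exists_cons_of_ne_nil hdne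
        rw [hdd, List.cons_append, List.cons_prefix_cons] at hq
        have hrc : rc ∈ r := List.mem_of_mem_drop (hdd ▸ List.mem_cons_self)
        have h2 : pvAscii rc = false := hr rc hrc
        have h3 : pvAscii o = true := by
          apply hg.2.1 o
          rw [h1]; exact List.mem_cons_self
        rw [hq.1] at h3
        rw [h3] at h2
        exact absurd h2 (by simp)
      rw [pvRep_skip o os hd.2 r.length (r ++ x) hj (by simp)]
      rw [List.take_left, List.drop_left]
    show pvFoldRep tl (PySem.Chars.replace (r ++ x) hd.1 hd.2)
        = r ++ pvFoldRep tl (PySem.Chars.replace x hd.1 hd.2)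
    rw [hskip]
    exact ih (fun pr hm => hT pr (List.mem_cons_of_mem _ hm)) _

theorem pvScan_nil_table : ∀ u, pvScan [] u = u := by
  intro u
  induction u with
  | nil => rw [pvScan]
  | cons c t ih => rw [pvScan]; simpa using ih

theorem pvMain (T : List (List Char × List Char)) (hT : ∀ pr ∈ T, pvGoodPair pr)
    (hP : List.Pairwise (fun x y => pvPatCond x.1 y.1) T) :
    ∀ u, (∀ c ∈ u, pvAscii c = true) → pvFoldRep T u = pvScan T u := by
  suffices H : ∀ n u, u.length ≤ n → (∀ c ∈ u, pvAscii c = true) →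
      pvFoldRep T u = pvScan T u by
    intro u hu; exact H u.length u le_rfl hu
  intro n
  induction n with
  | zero =>
    intro u hl hu
    have h0 : u = [] := List.eq_nil_of_length_eq_zero (Nat.le_zero.mp hl)
    subst h0
    rw [pvFoldRep_nil T (fun pr hm => (hT pr hm).1), pvScan]
  | succ n ih =>
    intro u hl hu
    cases u with
    | nil => rw [pvFoldRep_nil T (fun pr hm => (hT pr hm).1), pvScan]
    | cons c t =>
      cases hfind : (T.find? fun pr => pr.1.isPrefixOf (c :: t)) with
      | none =>
        have hnp : ∀ pr ∈ T, ¬ pr.1 <+: (c :: t) := by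
          intro pr hm
          have := List.find?_eq_none.mp hfind pr hm
          simpa [List.isPrefixOf_iff_prefix] using this
        rw [pvFoldRep_cons T hT c t hnp, pvScan, hfind]
        rw [ih t (by simp only [List.length_cons] at hl; omega)
          (fun c' hc => hu c' (List.mem_cons_of_mem _ hc))]
      | some pr =>
        obtain ⟨hpb, T₁, T₂, hTeq, hprior⟩ := List.find?_eq_some_iff_append.mp hfind
        have hp : pr.1 <+: (c :: t) := List.isPrefixOf_iff_prefix.mp hpb
        obtain ⟨w, hw⟩ := hp
        have hmemT : pr ∈ T := by
          rw [hTeq]; exact List.mem_append_right _ List.mem_cons_self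
        have hgood := hT pr hmemT
        obtain ⟨o, os, h1⟩ := List.exists_cons_of_ne_nil hgood.1
        have hlen1 : 1 ≤ pr.1.length := by rw [h1]; simp
        have hlenw : w.length ≤ n := by
          have := congrArg List.length hw
          simp only [List.length_append, List.length_cons] at this
          simp only [List.length_cons] at hl
          omega
        have hww : ∀ c' ∈ w, pvAscii c' = true := by
          intro c' hm
          apply hu c'
          rw [← hw]
          exact List.mem_append_right _ hm
        have e1 : ∀ s, pvFoldRep T s
            = pvFoldRep T₂ (PySem.Chars.replace (pvFoldRep T₁ s) pr.1 pr.2) := by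
          intro s
          rw [hTeq]
          simp [pvFoldRep, List.foldl_append]
        have hT1 : ∀ q ∈ T₁, q.1 ≠ [] ∧ pvPatCond q.1 pr.1 := by
          intro q hm
          refine ⟨(hT q (by rw [hTeq]; exact List.mem_append_left _ hm)).1, ?_⟩
          rw [hTeq] at hP
          exact (List.pairwise_append.mp hP).2.2 q hm pr List.mem_cons_self
        have hT2 : ∀ q ∈ T₂, pvGoodPair q := by
          intro q hm
          exact hT q (by rw [hTeq]; exact List.mem_append_right _ (List.mem_cons_of_mem _ hm))
        have hmid : ∀ x, PySem.Chars.replace (pr.1 ++ x) pr.1 pr.2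
            = pr.2 ++ PySem.Chars.replace x pr.1 pr.2 := by
          intro x
          rw [h1, pvReplace_eq_rep, pvReplace_eq_rep, List.cons_append, pvRep,
            if_pos (List.isPrefixOf_iff_prefix.mpr
              (by rw [← List.cons_append]; exact List.prefix_append _ _))]
          rw [List.drop_left]
        have hA : pvFoldRep T (c :: t) = pr.2 ++ pvFoldRep T w := by
          rw [← hw, e1 (pr.1 ++ w), e1 w]
          rw [pvFoldRep_keep_prefix T₁ pr.1 hT1 w, hmid]
          exact pvFoldRep_keep_cyr T₂ hT2 pr.2 hgood.2.2.2 _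
        have hB : pvScan T (c :: t) = pr.2 ++ pvScan T w := by
          rw [pvScan, hfind]
          have hdrop : t.drop (pr.1.length - 1) = w := by
            have h2 := hw
            rw [h1, List.cons_append, List.cons.injEq] at h2
            rw [← h2.2, h1, List.length_cons, Nat.add_sub_cancel, List.drop_left]
          simp [hdrop]
        rw [hA, hB, ih w hlenw hww]

theorem pvFoldStr_toList (L : List (String × String)) :
    ∀ f : String, (L.foldl (fun f pr => PySem.Str.replace f pr.1 pr.2) f).toList
      = pvFoldRep (L.map fun pr => (pr.1.toList, pr.2.toList)) f.toList := by
  induction L with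
  | nil => intro f; rfl
  | cons hd tl ih =>
    intro f
    simp only [List.foldl_cons, List.map_cons]
    rw [ih]
    show pvFoldRep _ (PySem.Str.replace f hd.1 hd.2).toList
      = pvFoldRep _ (PySem.Chars.replace f.toList hd.1.toList hd.2.toList)
    rw [PySem.Str.toList_replace]

-- ===== VERDICT (by name: the statement is the Claim_ definition above) =====
theorem common_excel_formula_spec : Claim_equal_common_excel_formula := by
  unfold Claim_equal_common_excel_formula
  intro lang formula hDom
  unfold Spec_common_excel_formula
  show (PySem.Dict.ofList [("ru", pvRuTable)] |>.getD lang []).foldl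
      (fun f pr => PySem.Str.replace f pr.1 pr.2) formula
    = common_excel_formula_alt lang formula
  rw [show common_excel_formula_alt lang formula
    = String.ofList (pvScan
        (((PySem.Dict.ofList [("ru", pvRuTable)]).getD lang []).map
          (fun pr => (pr.1.toList, pr.2.toList))) formula.toList) from rfl]
  by_cases hl : lang = "ru"
  · subst hl
    have hpkg : (PySem.Dict.ofList [("ru", pvRuTable)]).getD "ru" ([] : List (String × String))
        = pvRuTable := by decide
    rw [hpkg]
    have hallB : (pvRuTable.map (fun pr => (pr.1.toList, pr.2.toList))).all pvGoodPairB
        = true := by decide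
    have hpairB : pvPairB (pvRuTable.map (fun pr => (pr.1.toList, pr.2.toList))) = true := by
      decide
    have hTc : ∀ pr ∈ pvRuTable.map (fun pr => (pr.1.toList, pr.2.toList)), pvGoodPair pr :=
      fun pr hm => pvGoodPair_of_bool pr (List.all_eq_true.mp hallB pr hm)
    have hPc : List.Pairwise (fun x y => pvPatCond x.1 y.1)
        (pvRuTable.map (fun pr => (pr.1.toList, pr.2.toList))) :=
      pvPair_of_bool _ hpairB
    have hascii : ∀ c ∈ formula.toList, pvAscii c = true := by
      intro c hc
      have hD : pvDomStr formula = true := by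
        unfold Dom_common_excel_formula at hDom
        simp only [Bool.and_eq_true] at hDom
        exact hDom.2
      have := List.all_eq_true.mp hD c hc
      unfold pvDomChar at this
      unfold pvAscii
      simp only [Bool.or_eq_true, Bool.and_eq_true, decide_eq_true_eq, beq_iff_eq] at this
      simp only [decide_eq_true_eq]
      omega
    calc (pvRuTable.foldl (fun f pr => PySem.Str.replace f pr.1 pr.2) formula)
        = String.ofList (pvRuTable.foldl
            (fun f pr => PySem.Str.replace f pr.1 pr.2) formula).toList :=
          String.ofList_toList.symm
      _ = String.ofList (pvFoldRep (pvRuTable.map fun pr => (pr.1.toList, pr.2.toList))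
            formula.toList) := by rw [pvFoldStr_toList]
      _ = String.ofList (pvScan (pvRuTable.map fun pr => (pr.1.toList, pr.2.toList))
            formula.toList) := by
          rw [pvMain _ hTc hPc formula.toList hascii]
  · have hb : (("ru" : String) == lang) = false := by
      simp only [beq_eq_false_iff_ne, ne_eq]
      exact fun hh => hl hh.symm
    have hitems : (PySem.Dict.ofList [("ru", pvRuTable)]).items = [("ru", pvRuTable)] := by
      decide
    have hpkg : (PySem.Dict.ofList [("ru", pvRuTable)]).getD lang ([] : List (String × String))
        = [] := by
      rw [PySem.Dict.getD, PySem.Dict.get?, hitems]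
      simp [hb]
    rw [hpkg]
    simp only [List.map_nil, List.foldl_nil]
    rw [pvScan_nil_table, String.ofList_toList]
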